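-- pv_equiv track=rewrite | github.com/ocirne/adventofcode | python/src/aoc/year2023/day3.py | detect_part_numbers
-- ===== SOURCE A (Python) =====
-- def is_symbol(d, y, x):
--     if y < 0 or len(d) <= y:
--         return False
--     if x < 0 or len(d[y]) <= x:
--         return False
--     c = d[y][x]
--     return not (c.isdigit() or c == ".")
--
-- def detect_part_numbers(d):
--     part_number = ""
--     part_flag = False
--     for y in range(len(d)):
--         for x in range(len(d[y])):
--             c = d[y][x]
--             if not part_number and c.isdigit():
--                 # start of a number
--                 if is_symbol(d, y - 1, x - 1) or is_symbol(d, y, x - 1) or is_symbol(d, y + 1, x - 1):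
--                     part_flag = True
--                 if is_symbol(d, y - 1, x) or is_symbol(d, y + 1, x):
--                     part_flag = True
--                 part_number += c
--             elif part_number and c.isdigit():
--                 # in a number
--                 if is_symbol(d, y - 1, x) or is_symbol(d, y + 1, x):
--                     part_flag = True
--                 part_number += c
--             elif part_number and not c.isdigit():
--                 # end of a number
--                 if is_symbol(d, y - 1, x) or is_symbol(d, y, x) or is_symbol(d, y + 1, x):
--                     part_flag = True
--                 if part_flag:
--                     yield int(part_number)
--                 part_number = ""
--                 part_flag = False
--         if part_number:
--             # end of a number on a line
--             if part_flag:
--                 yield int(part_number)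
--             part_number = ""
--             part_flag = False
-- ===== SOURCE B (Python) =====
-- def is_symbol(d, y, x):
--     if y < 0 or len(d) <= y:
--         return False
--     if x < 0 or len(d[y]) <= x:
--         return False
--     c = d[y][x]
--     return not (c.isdigit() or c == ".")
--
-- def detect_part_numbers(d):
--     # Run-based scan: per row, find maximal digit runs and test the run's perimeter.
--     for y, row in enumerate(d):
--         x = 0
--         while x < len(row):
--             if not row[x].isdigit():
--                 x += 1
--                 continue
--             x0 = x
--             while x < len(row) and row[x].isdigit():
--                 x += 1
--             x1 = x - 1
--             adjacent = (
--                 is_symbol(d, y - 1, x0 - 1) or is_symbol(d, y, x0 - 1) or is_symbol(d, y + 1, x0 - 1)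
--                 or any(is_symbol(d, y - 1, i) or is_symbol(d, y + 1, i) for i in range(x0, x1 + 1))
--                 or (x1 + 1 < len(row)
--                     and (is_symbol(d, y - 1, x1 + 1) or is_symbol(d, y, x1 + 1) or is_symbol(d, y + 1, x1 + 1))))
--             if adjacent:
--                 yield int(row[x0:x1 + 1])
-- ===== Notes on version B (the rewrite author's own statement) =====
-- stated objective: alternative
-- what changed: A's cell-by-cell state machine carrying part_number/part_flag across every grid cell is replaced by a run-based scan: per row, each maximal digit run is located with an inner digit-spanning loop and its bounding-box perimeter is tested for symbols.
import Mathlib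
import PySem

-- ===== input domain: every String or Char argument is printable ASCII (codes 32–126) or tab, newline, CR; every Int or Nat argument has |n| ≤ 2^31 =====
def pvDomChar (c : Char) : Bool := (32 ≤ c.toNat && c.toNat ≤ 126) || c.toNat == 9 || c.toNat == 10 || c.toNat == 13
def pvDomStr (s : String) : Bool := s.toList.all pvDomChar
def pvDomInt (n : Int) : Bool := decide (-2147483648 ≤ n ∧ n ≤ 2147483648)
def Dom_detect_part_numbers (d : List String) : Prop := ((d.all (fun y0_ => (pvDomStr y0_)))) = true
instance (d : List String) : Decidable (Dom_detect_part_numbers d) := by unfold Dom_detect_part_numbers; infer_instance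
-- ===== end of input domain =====

-- B replaces A's character-by-character state machine (part_number/part_flag carried
-- across cells) by a run-based scan: per row, find each maximal digit run and test the
-- perimeter of its bounding box; objective: alternative decomposition, similar cost.

-- ===== PORT A =====
-- shared helper: Python is_symbol (bounds are checked first, so getD defaults are never read)
def isSym (d : List String) (y x : Int) : Bool :=
  if y < 0 ∨ (d.length : Int) ≤ y then false
  else
    let row := (d.getD y.toNat "").toList
    if x < 0 ∨ (row.length : Int) ≤ x then false
    else
      let c := row.getD x.toNat ' '
      !(PySem.Chars.isdigit c || c == '.')

-- shared helper: int(s) for a nonempty all-digit string (never raises there)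
def intOf (cs : List Char) : Int := (PySem.Int.ofChars? cs).getD 0

-- A's inner loop over one row, carrying part_number (as List Char) and part_flag;
-- the [] case is A's end-of-row flush.
def aLoop (d : List String) (y : Int) (row : List Char) (x : Int) (num : List Char) (flag : Bool) : List Int :=
  match row with
  | [] => if num ≠ [] then (if flag then [intOf num] else []) else []
  | c :: rest =>
    if num.isEmpty && PySem.Chars.isdigit c then
      let f := (flag || (isSym d (y-1) (x-1) || isSym d y (x-1) || isSym d (y+1) (x-1)))
               || (isSym d (y-1) x || isSym d (y+1) x)
      aLoop d y rest (x+1) (num ++ [c]) f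
    else if !num.isEmpty && PySem.Chars.isdigit c then
      let f := flag || (isSym d (y-1) x || isSym d (y+1) x)
      aLoop d y rest (x+1) (num ++ [c]) f
    else if !num.isEmpty && !PySem.Chars.isdigit c then
      let f := flag || (isSym d (y-1) x || isSym d y x || isSym d (y+1) x)
      (if f then [intOf num] else []) ++ aLoop d y rest (x+1) [] false
    else
      aLoop d y rest (x+1) num flag

def detect_part_numbers (d : List String) : List Int :=
  (PySem.List.enumerate d).flatMap (fun p => aLoop d p.1 p.2.toList 0 [] false)

-- ===== PORT B =====
-- B's row scan: at a digit, span the maximal run (inner while = takeWhile/dropWhile),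
-- test the run's perimeter, emit, continue after the run. rowLen = len(row) of the full row.
def bScan (d : List String) (y : Int) (rowLen : Int) (row : List Char) (x : Int) : List Int :=
  match row with
  | [] => []
  | c :: rest =>
    if PySem.Chars.isdigit c then
      let digits := c :: rest.takeWhile PySem.Chars.isdigit
      let rest' := rest.dropWhile PySem.Chars.isdigit
      let x1 : Int := x + (digits.length : Int) - 1
      let adj := (isSym d (y-1) (x-1) || isSym d y (x-1) || isSym d (y+1) (x-1))
              || (PySem.List.pyRange x (x1+1) 1).any (fun i => isSym d (y-1) i || isSym d (y+1) i)
              || (decide (x1+1 < rowLen) && (isSym d (y-1) (x1+1) || isSym d y (x1+1) || isSym d (y+1) (x1+1)))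
      (if adj then [intOf digits] else []) ++ bScan d y rowLen rest' (x1+1)
    else bScan d y rowLen rest (x+1)
termination_by row.length
decreasing_by
  · have := List.length_dropWhile_le PySem.Chars.isdigit rest
    simp; omega
  · simp

def detect_part_numbers_alt (d : List String) : List Int :=
  (PySem.List.enumerate d).flatMap (fun p => bScan d p.1 (p.2.toList.length : Int) p.2.toList 0)

-- ===== PRECONDITION & SPEC =====
def Spec_detect_part_numbers (d : List String) (out : List Int) : Prop := out = detect_part_numbers_alt d
instance (d : List String) (out : List Int) : Decidable (Spec_detect_part_numbers d out) := by unfold Spec_detect_part_numbers; infer_instance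

-- ===== CLAIM (what is proved, stated in full; the proofs are below) =====
def Claim_equal_detect_part_numbers : Prop := ∀ (d : List String), Dom_detect_part_numbers d → Spec_detect_part_numbers d (detect_part_numbers d)

-- ===== LEMMAS AND PROOFS =====

lemma aLoop_in_num (d : List String) (y : Int) :
    ∀ (rest : List Char) (x : Int) (num : List Char) (flag : Bool), num ≠ [] →
    aLoop d y rest x num flag =
      (if (flag
            || (PySem.List.pyRange x (x + ((rest.takeWhile PySem.Chars.isdigit).length : Int)) 1).any
                 (fun i => isSym d (y-1) i || isSym d (y+1) i)
            || (!(rest.dropWhile PySem.Chars.isdigit).isEmpty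
                && (isSym d (y-1) (x + ((rest.takeWhile PySem.Chars.isdigit).length : Int))
                    || isSym d y (x + ((rest.takeWhile PySem.Chars.isdigit).length : Int))
                    || isSym d (y+1) (x + ((rest.takeWhile PySem.Chars.isdigit).length : Int)))))
        then [intOf (num ++ rest.takeWhile PySem.Chars.isdigit)] else [])
      ++ (match rest.dropWhile PySem.Chars.isdigit with
          | [] => []
          | _ :: r => aLoop d y r (x + ((rest.takeWhile PySem.Chars.isdigit).length : Int) + 1) [] false) := by
  intro rest
  induction rest with
  | nil =>
    intro x num flag hnum
    simp [aLoop, hnum, PySem.List.pyRange_one_eq_nil]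
  | cons c rest ih =>
    intro x num flag hnum
    by_cases hc : PySem.Chars.isdigit c
    · have hne : ¬ num.isEmpty := by simpa using hnum
      rw [show aLoop d y (c :: rest) x num flag
            = aLoop d y rest (x+1) (num ++ [c]) (flag || (isSym d (y-1) x || isSym d (y+1) x)) from by
        simp [aLoop, hne, hc]]
      rw [ih (x+1) (num ++ [c]) _ (by simp)]
      have hTW : (c :: rest).takeWhile PySem.Chars.isdigit = c :: rest.takeWhile PySem.Chars.isdigit := by
        simp [hc]
      have hDW : (c :: rest).dropWhile PySem.Chars.isdigit = rest.dropWhile PySem.Chars.isdigit := by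
        simp [hc]
      rw [hTW, hDW]
      have hlen : x + (((c :: rest.takeWhile PySem.Chars.isdigit)).length : Int)
          = x + 1 + ((rest.takeWhile PySem.Chars.isdigit).length : Int) := by
        simp; ring
      rw [hlen]
      have hrange : PySem.List.pyRange x (x + 1 + ((rest.takeWhile PySem.Chars.isdigit).length : Int)) 1
          = x :: PySem.List.pyRange (x+1) (x + 1 + ((rest.takeWhile PySem.Chars.isdigit).length : Int)) 1 := by
        rw [PySem.List.pyRange_one_cons (by omega)]
      rw [hrange]
      simp only [List.any_cons, Bool.or_assoc, List.append_assoc, List.singleton_append]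
    · have hne : ¬ num.isEmpty := by simpa using hnum
      rw [show aLoop d y (c :: rest) x num flag
            = (if (flag || (isSym d (y-1) x || isSym d y x || isSym d (y+1) x)) then [intOf num] else [])
              ++ aLoop d y rest (x+1) [] false from by
        simp [aLoop, hne, hc]]
      have hTW : (c :: rest).takeWhile PySem.Chars.isdigit = [] := by
        simp [hc]
      have hDW : (c :: rest).dropWhile PySem.Chars.isdigit = c :: rest := by
        simp [hc]
      rw [hTW, hDW]
      simp [PySem.List.pyRange_one_eq_nil]

lemma aLoop_eq_bScan (d : List String) (y : Int) :
    ∀ (n : Nat) (row : List Char) (x rowLen : Int), row.length ≤ n →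
      rowLen = x + (row.length : Int) →
      aLoop d y row x [] false = bScan d y rowLen row x := by
  intro n
  induction n with
  | zero =>
    intro row x rowLen hlen _
    have : row = [] := by
      cases row with
      | nil => rfl
      | cons a b => simp at hlen
    subst this
    simp [aLoop, bScan]
  | succ n ih =>
    intro row x rowLen hlen hinv
    cases row with
    | nil => simp [aLoop, bScan]
    | cons c rest =>
      by_cases hc : PySem.Chars.isdigit c
      · -- A takes the "start of a number" branch then runs aLoop_in_num
        rw [show aLoop d y (c :: rest) x [] false
              = aLoop d y rest (x+1) [c]
                  ((false || (isSym d (y-1) (x-1) || isSym d y (x-1) || isSym d (y+1) (x-1)))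
                   || (isSym d (y-1) x || isSym d (y+1) x)) from by
          simp [aLoop, hc]]
        rw [aLoop_in_num d y rest (x+1) [c] _ (by simp)]
        conv_rhs => rw [bScan]
        simp only [hc, if_true, List.length_cons]
        push_cast
        ring_nf
        set tw := rest.takeWhile PySem.Chars.isdigit with htw
        set dw := rest.dropWhile PySem.Chars.isdigit with hdw
        have hsum : tw.length + dw.length = rest.length := by
          have h0 := congrArg List.length (List.takeWhile_append_dropWhile (p := PySem.Chars.isdigit) (l := rest))
          rw [List.length_append] at h0
          exact h0
        have hguard : decide (1 + x + (tw.length : Int) < rowLen) = !dw.isEmpty := by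
          simp only [hinv, List.length_cons]
          cases hdwE : dw with
          | nil =>
            have h1 : tw.length = rest.length := by
              have : dw.length = 0 := by rw [hdwE]; simp
              omega
            simp [h1]
            omega
          | cons a b =>
            have h1 : tw.length < rest.length := by
              have : dw.length = b.length + 1 := by rw [hdwE]; simp
              omega
            simp only [List.isEmpty_cons, Bool.not_false, decide_eq_true_eq]
            push_cast
            omega
        rw [hguard]
        have hrange : PySem.List.pyRange x (1 + x + (tw.length : Int)) 1
            = x :: PySem.List.pyRange (x + 1) (1 + x + (tw.length : Int)) 1 := by
          rw [PySem.List.pyRange_one_cons (by omega)]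
        rw [hrange]
        have hstep : PySem.List.pyRange (x + 1) (1 + x + (tw.length : Int)) 1
            = PySem.List.pyRange (1 + x) (1 + x + (tw.length : Int)) 1 := by ring_nf
        rw [hstep]
        congr 1
        · congr 1
          simp only [List.any_cons, Bool.or_assoc, Bool.false_or]
        · cases hdwE : dw with
          | nil => rw [bScan]
          | cons c' r =>
            have h4 : List.dropWhile PySem.Chars.isdigit rest = c' :: r := by rw [← hdw]; exact hdwE
            have hc' : PySem.Chars.isdigit c' = false := by
              have h2 : List.dropWhile PySem.Chars.isdigit rest ≠ [] := by simp [h4]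
              have h3 := List.head_dropWhile_not (l := rest) (p := PySem.Chars.isdigit) h2
              simp only [h4] at h3
              simpa using h3
            rw [show bScan d y rowLen (c' :: r) (1 + x + (tw.length : Int))
                  = bScan d y rowLen r (1 + x + (tw.length : Int) + 1) from by
              rw [bScan]; simp [hc']]
            rw [show (2 + x + (tw.length : Int)) = 1 + x + (tw.length : Int) + 1 from by ring]
            apply ih
            · have h4 : dw.length = r.length + 1 := by rw [hdwE]; simp
              simp at hlen
              omega
            · rw [hinv]
              have h4 : dw.length = r.length + 1 := by rw [hdwE]; simp
              push_cast [List.length_cons]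
              omega
      · rw [show aLoop d y (c :: rest) x [] false = aLoop d y rest (x+1) [] false from by
          simp [aLoop, hc]]
        rw [show bScan d y rowLen (c :: rest) x = bScan d y rowLen rest (x+1) from by
          rw [bScan]; simp [hc]]
        apply ih
        · simp at hlen; omega
        · rw [hinv]; push_cast [List.length_cons]; ring

-- ===== VERDICT (by name: the statement is the Claim_ definition above) =====
theorem detect_part_numbers_spec : Claim_equal_detect_part_numbers := by
  intro d _
  unfold Spec_detect_part_numbers detect_part_numbers detect_part_numbers_alt
  apply List.flatMap_congr
  intro p _
  exact aLoop_eq_bScan d p.1 p.2.toList.length p.2.toList 0 p.2.toList.length le_rfl (by simp)
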